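-- pv_equiv track=rewrite | github.com/FalseNegativeLab/mlscorecheck | mlscorecheck/core/_folds.py | stratified_configurations
-- ===== SOURCE A (Python) =====
-- def stratified_configurations(n0, n1, n_splits):
--     n0_base = n0 // n_splits
--     n1_base = n1 // n_splits
--     n0_remainder = n0 % n_splits
--     n1_remainder = n1 % n_splits
--
--     results = [(n0_base, n1_base)] * n_splits
--
--     idx = 0
--     while n0_remainder > 0:
--         results[idx] = (results[idx][0] + 1, results[idx][1])
--         n0_remainder -= 1
--         idx += 1
--         idx = idx % n_splits
--     while n1_remainder > 0:
--         results[idx] = (results[idx][0], results[idx][1] + 1)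
--         n1_remainder -= 1
--         idx += 1
--         idx = idx % n_splits
--
--     return results
-- ===== SOURCE B (Python) =====
-- def stratified_configurations(n0, n1, n_splits):
--     q0, r0 = divmod(n0, n_splits)
--     q1, r1 = divmod(n1, n_splits)
--     return [
--         (q0 + (1 if i < r0 else 0),
--          q1 + (1 if (r0 <= i < r0 + r1 or i < r0 + r1 - n_splits) else 0))
--         for i in range(n_splits)
--     ]
-- ===== Notes on version B (the rewrite author's own statement) =====
-- stated objective: simpler
-- what changed: Replaces the two in-place remainder-distributing while-loops (with a carried index pointer) by a single comprehension computing each fold's pair in closed form: fold i gets an extra n0 item iff i < n0%n_splits, and an extra n1 item iff i lies in the wrap-around window of length n1%n_splits starting at n0%n_splits.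
import Mathlib
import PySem

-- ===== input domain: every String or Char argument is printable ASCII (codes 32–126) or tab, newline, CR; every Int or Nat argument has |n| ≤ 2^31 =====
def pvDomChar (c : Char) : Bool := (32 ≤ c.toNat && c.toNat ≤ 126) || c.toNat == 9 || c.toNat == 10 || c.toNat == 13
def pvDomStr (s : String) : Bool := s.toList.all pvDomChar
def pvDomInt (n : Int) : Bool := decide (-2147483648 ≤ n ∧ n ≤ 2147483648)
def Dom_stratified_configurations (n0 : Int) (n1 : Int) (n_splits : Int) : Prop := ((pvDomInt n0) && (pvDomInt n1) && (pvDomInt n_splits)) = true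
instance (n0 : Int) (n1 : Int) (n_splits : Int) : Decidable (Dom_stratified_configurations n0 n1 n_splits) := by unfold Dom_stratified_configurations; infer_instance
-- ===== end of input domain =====

-- B replaces A's two mutating remainder-distribution while-loops by one closed-form comprehension per fold (objective: simpler).

-- ===== PORT A =====
-- Both Python while-loops have the same shape (bump results[idx], decrement the remainder,
-- advance idx modulo n_splits); stratWhile is that loop, parametrised by the bump f.
-- Python's results[idx] would raise IndexError on an empty list, but the loop body is only
-- reached when a remainder is positive, which forces n_splits > 0 and a nonempty list, so
-- getD's default is never used and the port is exact on Pre_.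
def stratWhile (f : Int × Int → Int × Int) (n : Int) (results : List (Int × Int)) (rem : Int) (idx : Int) : List (Int × Int) × Int :=
  if 0 < rem then
    stratWhile f n (results.set idx.toNat (f (results.getD idx.toNat (0, 0)))) (rem - 1) (PySem.Int.mod (idx + 1) n)
  else (results, idx)
termination_by rem.toNat
decreasing_by omega

def stratified_configurations (n0 : Int) (n1 : Int) (n_splits : Int) : List (Int × Int) :=
  let n0_base := PySem.Int.floordiv n0 n_splits
  let n1_base := PySem.Int.floordiv n1 n_splits
  let n0_remainder := PySem.Int.mod n0 n_splits
  let n1_remainder := PySem.Int.mod n1 n_splits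
  let results := List.replicate n_splits.toNat (n0_base, n1_base)
  let p := stratWhile (fun r => (r.1 + 1, r.2)) n_splits results n0_remainder 0
  let q := stratWhile (fun r => (r.1, r.2 + 1)) n_splits p.1 n1_remainder p.2
  q.1

-- ===== PORT B =====
def stratified_configurations_alt (n0 : Int) (n1 : Int) (n_splits : Int) : List (Int × Int) :=
  let q0 := PySem.Int.floordiv n0 n_splits
  let r0 := PySem.Int.mod n0 n_splits
  let q1 := PySem.Int.floordiv n1 n_splits
  let r1 := PySem.Int.mod n1 n_splits
  (PySem.List.pyRange 0 n_splits 1).map (fun i =>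
    (q0 + (if i < r0 then 1 else 0),
     q1 + (if (r0 ≤ i ∧ i < r0 + r1) ∨ i < r0 + r1 - n_splits then 1 else 0)))

-- ===== PRECONDITION & SPEC =====
-- Pre_ excludes exactly n_splits = 0, on which Python A raises ZeroDivisionError.
def Pre_stratified_configurations (n0 : Int) (n1 : Int) (n_splits : Int) : Prop := n_splits ≠ 0
instance (n0 : Int) (n1 : Int) (n_splits : Int) : Decidable (Pre_stratified_configurations n0 n1 n_splits) := by unfold Pre_stratified_configurations; infer_instance
def pvWitness_stratified_configurations : Int × Int × Int := (5, 3, 2)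

def Spec_stratified_configurations (n0 : Int) (n1 : Int) (n_splits : Int) (out : List (Int × Int)) : Prop := out = stratified_configurations_alt n0 n1 n_splits
instance (n0 : Int) (n1 : Int) (n_splits : Int) (out : List (Int × Int)) : Decidable (Spec_stratified_configurations n0 n1 n_splits out) := by unfold Spec_stratified_configurations; infer_instance

-- ===== CLAIM (what is proved, stated in full; the proofs are below) =====
def Claim_equal_stratified_configurations : Prop := ∀ (n0 : Int) (n1 : Int) (n_splits : Int), Dom_stratified_configurations n0 n1 n_splits → Pre_stratified_configurations n0 n1 n_splits → Spec_stratified_configurations n0 n1 n_splits (stratified_configurations n0 n1 n_splits)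

-- ===== LEMMAS AND PROOFS =====

theorem stratWhile_exit (f : Int × Int → Int × Int) (n : Int) (results : List (Int × Int)) (rem : Int) (idx : Int) (h : ¬ 0 < rem) :
    stratWhile f n results rem idx = (results, idx) := by
  rw [stratWhile, if_neg h]

theorem stratWhile_step (f : Int × Int → Int × Int) (n : Int) (results : List (Int × Int)) (rem : Int) (idx : Int) (h : 0 < rem) :
    stratWhile f n results rem idx =
      stratWhile f n (results.set idx.toNat (f (results.getD idx.toNat (0, 0)))) (rem - 1) (PySem.Int.mod (idx + 1) n) := by
  rw [stratWhile]; rw [if_pos h]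

theorem stratWhile_nowrap (f : Int × Int → Int × Int) (n : Int) (rem idx : Nat) (results : List (Int × Int))
    (hn : (results.length : Int) = n) (hidx : idx < results.length) (hsum : idx + rem ≤ results.length) :
    stratWhile f n results (rem : Int) (idx : Int) =
      (results.mapIdx (fun p x => if idx ≤ p ∧ p < idx + rem then f x else x),
       PySem.Int.mod ((idx : Int) + (rem : Int)) n) := by
  induction rem generalizing idx results with
  | zero =>
    rw [stratWhile, if_neg (by omega)]
    rw [Prod.mk.injEq]
    refine ⟨?_, ?_⟩
    · apply List.ext_getElem (by simp)
      intro p h1 h2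
      simp only [List.getElem_mapIdx]
      rw [if_neg (by omega)]
    · simp only [Nat.cast_zero, add_zero]
      rw [PySem.Int.mod_eq_emod_of_pos (by omega), Int.emod_eq_of_lt (by omega) (by omega)]
  | succ r ih =>
    rw [stratWhile, if_pos (by push_cast; omega)]
    simp only [Int.toNat_natCast]
    rw [List.getD_eq_getElem results (0,0) hidx]
    set results' := results.set idx (f results[idx]) with hres'
    have hlen' : results'.length = results.length := by simp [hres']
    by_cases hc : idx + 1 < results.length
    · have hmod : PySem.Int.mod ((idx : Int) + 1) n = ((idx + 1 : Nat) : Int) := by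
        rw [PySem.Int.mod_eq_emod_of_pos (by omega)]
        rw [Int.emod_eq_of_lt (by omega) (by omega)]
        push_cast; ring
      have harith : ((r + 1 : Nat) : Int) - 1 = (r : Nat) := by push_cast; ring
      rw [hmod, harith, ih (idx + 1) results' (by omega) (by omega) (by omega)]
      rw [Prod.mk.injEq]
      refine ⟨?_, ?_⟩
      · apply List.ext_getElem (by simp [results'])
        intro p h1 h2
        simp only [List.getElem_mapIdx, hres', List.getElem_set]
        by_cases hp : idx = p
        · subst hp
          rw [if_neg (by omega), if_pos rfl, if_pos (by omega)]
        · rw [if_neg hp]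
          by_cases hw : idx + 1 ≤ p ∧ p < idx + 1 + r
          · rw [if_pos hw, if_pos (by omega)]
          · rw [if_neg hw, if_neg (by omega)]
      · congr 1; push_cast; ring
    · -- idx + 1 = results.length, hence r = 0 and the recursive call exits at once
      have hr : r = 0 := by omega
      subst hr
      rw [stratWhile, if_neg (by norm_num)]
      rw [Prod.mk.injEq]
      refine ⟨?_, ?_⟩
      · apply List.ext_getElem (by simp [results'])
        intro p h1 h2
        simp only [List.getElem_mapIdx, hres', List.getElem_set]
        by_cases hp : idx = p
        · subst hp; rw [if_pos rfl, if_pos (by omega)]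
        · rw [if_neg hp]
          split_ifs with hw
          · exact absurd hw (by omega)
          · rfl
      · congr 1

theorem stratWhile_split (f : Int × Int → Int × Int) (n : Int) (a b : Nat) (results : List (Int × Int)) (idx : Int) :
    stratWhile f n results ((a : Int) + (b : Int)) idx =
      stratWhile f n (stratWhile f n results (a : Int) idx).1 (b : Int) (stratWhile f n results (a : Int) idx).2 := by
  induction a generalizing results idx with
  | zero =>
    rw [stratWhile_exit f n results ((0:Nat) : Int) idx (by norm_num)]
    norm_num
  | succ a ih =>
    rw [stratWhile_step f n results (((a+1:Nat) : Int) + (b : Int)) idx (by push_cast; omega)]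
    rw [stratWhile_step f n results (((a+1:Nat) : Int)) idx (by push_cast; omega)]
    have h1 : ((a+1:Nat) : Int) + (b : Int) - 1 = ((a:Nat) : Int) + (b : Int) := by push_cast; ring
    have h2 : ((a+1:Nat) : Int) - 1 = ((a:Nat) : Int) := by push_cast; ring
    rw [h1, h2]
    exact ih _ _

theorem main_eq (n0 n1 ns : Int) (hns : ns ≠ 0) :
    stratified_configurations n0 n1 ns = stratified_configurations_alt n0 n1 ns := by
  simp only [stratified_configurations, stratified_configurations_alt]
  rcases lt_or_gt_of_ne hns with hneg | hpos
  · -- n_splits < 0 : both remainders are ≤ 0 (sign of the divisor), both loops exit, both lists empty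
    have hr0 : PySem.Int.mod n0 ns ≤ 0 := (PySem.Int.mod_neg_bounds (a := n0) hneg).2
    have hr1 : PySem.Int.mod n1 ns ≤ 0 := (PySem.Int.mod_neg_bounds (a := n1) hneg).2
    rw [stratWhile_exit _ _ _ _ _ (by omega), stratWhile_exit _ _ _ _ _ (by omega)]
    rw [PySem.List.pyRange_one_eq_nil (by omega)]
    have : ns.toNat = 0 := by omega
    simp [this]
  · -- 0 < n_splits
    set q0 := PySem.Int.floordiv n0 ns with hq0
    set q1 := PySem.Int.floordiv n1 ns with hq1
    set r0 := PySem.Int.mod n0 ns with hr0d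
    set r1 := PySem.Int.mod n1 ns with hr1d
    have hb0 : 0 ≤ r0 ∧ r0 < ns := ⟨PySem.Int.mod_nonneg (a := n0) hpos, PySem.Int.mod_lt (a := n0) hpos⟩
    have hb1 : 0 ≤ r1 ∧ r1 < ns := ⟨PySem.Int.mod_nonneg (a := n1) hpos, PySem.Int.mod_lt (a := n1) hpos⟩
    set N := ns.toNat with hNd
    have hNs : (N : Int) = ns := by omega
    set R0 := r0.toNat with hR0d
    set R1 := r1.toNat with hR1d
    have hR0 : (R0 : Int) = r0 := by omega
    have hR1 : (R1 : Int) = r1 := by omega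
    set res0 := List.replicate N (q0, q1) with hres0
    have hlen0 : res0.length = N := by simp [hres0]
    have hN0 : 0 < N := by omega
    -- first loop
    have e0 := stratWhile_nowrap (fun r => (r.1 + 1, r.2)) ns R0 0 res0
      (by rw [hlen0, hNs]) (by omega) (by omega)
    rw [show ((0:Nat) : Int) = (0 : Int) by simp] at e0
    have emod0 : PySem.Int.mod ((0:Int) + (R0 : Int)) ns = (R0 : Int) := by
      rw [PySem.Int.mod_eq_emod_of_pos (by omega), Int.emod_eq_of_lt (by omega) (by omega)]
      ring
    rw [emod0] at e0
    rw [← hR0, e0]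
    set L1 := res0.mapIdx (fun p x => if 0 ≤ p ∧ p < 0 + R0 then (fun r => (r.1 + 1, r.2)) x else x) with hL1
    have hlen1 : L1.length = N := by simp [hL1, hlen0]
    by_cases hc : R0 + R1 ≤ N
    · -- second loop does not wrap
      have e1 := stratWhile_nowrap (fun r => (r.1, r.2 + 1)) ns R1 R0 L1
        (by rw [hlen1, hNs]) (by omega) (by omega)
      rw [← hR1, e1]
      apply List.ext_getElem
      · simp [PySem.List.length_pyRange_one]
        omega
      · intro p h1 h2
        simp only [List.getElem_mapIdx, List.getElem_map, PySem.List.getElem_pyRange_one,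
          List.getElem_replicate, hL1, hres0]
        have hpN : p < N := by rw [List.length_mapIdx, List.length_mapIdx, hlen0] at h1; exact h1
        split_ifs <;> rw [Prod.ext_iff] <;> constructor <;> (try dsimp only) <;> omega
    · -- second loop wraps past the end of the list: split it at the wrap
      have hsplit : (R1 : Int) = ((N - R0 : Nat) : Int) + ((R0 + R1 - N : Nat) : Int) := by
        omega
      rw [← hR1, hsplit, stratWhile_split]
      have eA := stratWhile_nowrap (fun r => (r.1, r.2 + 1)) ns (N - R0) R0 L1
        (by rw [hlen1, hNs]) (by omega) (by omega)
      rw [eA]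
      set L2 := L1.mapIdx (fun p x => if R0 ≤ p ∧ p < R0 + (N - R0) then (fun r => (r.1, r.2 + 1)) x else x) with hL2
      have hlen2 : L2.length = N := by simp [hL2, hlen1]
      have emodN : PySem.Int.mod ((R0 : Int) + ((N - R0 : Nat) : Int)) ns = ((0:Nat) : Int) := by
        have : (R0 : Int) + ((N - R0 : Nat) : Int) = ns := by push_cast [Nat.cast_sub (by omega : R0 ≤ N)]; omega
        rw [this, PySem.Int.mod_eq_emod_of_pos (by omega)]
        simp
      rw [emodN]
      have eB := stratWhile_nowrap (fun r => (r.1, r.2 + 1)) ns (R0 + R1 - N) 0 L2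
        (by rw [hlen2, hNs]) (by omega) (by omega)
      rw [eB]
      apply List.ext_getElem
      · simp [hlen2, PySem.List.length_pyRange_one]
        omega
      · intro p h1 h2
        simp only [List.getElem_mapIdx, List.getElem_map, PySem.List.getElem_pyRange_one,
          List.getElem_replicate, hL2, hL1, hres0]
        have hpN : p < N := by
          rw [List.length_mapIdx, List.length_mapIdx, List.length_mapIdx, hlen0] at h1; exact h1
        split_ifs <;> rw [Prod.ext_iff] <;> constructor <;> (try dsimp only) <;> omega

-- ===== VERDICT (by name: the statement is the Claim_ definition above) =====
theorem stratified_configurations_spec : Claim_equal_stratified_configurations := by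
  intro n0 n1 ns _ hpre
  unfold Spec_stratified_configurations
  exact main_eq n0 n1 ns hpre
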